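-- pv_equiv track=rewrite | github.com/junebug-junie/Orion-Sapienform | orion/normalizers/agent_trace.py | _counts_with_order
-- ===== SOURCE A (Python) =====
-- from collections import Counter
-- from typing import Any, Dict, Iterable, List, Literal, Optional
--
-- def _counts_with_order(counter: Counter[str], order: List[str]) -> Dict[str, int]:
--     out: Dict[str, int] = {}
--     for key in order:
--         out[key] = int(counter.get(key, 0))
--     extras = [key for key in counter.keys() if key not in out]
--     for key in sorted(extras):
--         out[key] = int(counter[key])
--     return out
-- ===== SOURCE B (Python) =====
-- from collections import Counter
-- from typing import Dict, List
--
--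
-- def _counts_with_order(counter: "Counter[str]", order: List[str]) -> Dict[str, int]:
--     ordered = list(dict.fromkeys(order))          # order keys, first occurrences
--     pos = {k: i for i, k in enumerate(ordered)}   # first-occurrence rank
--     n = len(order)
--     keys = set(order) | set(counter.keys())
--     def sortkey(k):
--         return (pos[k], '') if k in pos else (n, k)
--     return {k: int(counter.get(k, 0)) for k in sorted(keys, key=sortkey)}
-- ===== Notes on version B (the rewrite author's own statement) =====
-- stated objective: alternative
-- what changed: Instead of building the dict incrementally (order loop, then a membership-filtered extras list sorted and appended), B computes a first-occurrence rank map for the order keys and sorts the whole key set once with a composite key ((rank,'') for order keys, (len(order),key) for extras), then emits the result in one comprehension.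
import Mathlib
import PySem

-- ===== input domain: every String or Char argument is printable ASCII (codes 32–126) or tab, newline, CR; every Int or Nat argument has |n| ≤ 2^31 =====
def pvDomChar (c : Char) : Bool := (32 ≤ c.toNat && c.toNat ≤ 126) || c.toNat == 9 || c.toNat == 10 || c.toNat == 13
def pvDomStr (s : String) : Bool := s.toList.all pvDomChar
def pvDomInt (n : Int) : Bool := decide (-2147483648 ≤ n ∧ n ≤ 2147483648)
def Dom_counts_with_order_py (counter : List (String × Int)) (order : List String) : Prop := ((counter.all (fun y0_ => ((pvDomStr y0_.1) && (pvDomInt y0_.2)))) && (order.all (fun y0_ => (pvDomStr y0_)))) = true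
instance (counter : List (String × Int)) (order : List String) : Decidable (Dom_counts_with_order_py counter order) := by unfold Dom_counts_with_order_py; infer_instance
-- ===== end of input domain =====

-- B replaces A's incremental dict construction (order loop, then sorted extras appended)
-- by one composite-key sort of the whole key set; alternative decomposition, same values.

-- ===== PORT A =====
def counts_with_order_py (counter : List (String × Int)) (order : List String) : List (String × Int) :=
  let d := PySem.Dict.ofList counter
  let out := order.foldl (fun o key => o.insert key (d.getD key 0)) PySem.Dict.empty
  let extras := d.keys.filter (fun key => !(out.contains key))
  let out2 := (PySem.List.sorted extras (fun x => x) false).foldl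
    (fun o key => o.insert key (d.getD key 0)) out
  out2.items

-- ===== PORT B =====
def counts_with_order_py_alt (counter : List (String × Int)) (order : List String) : List (String × Int) :=
  let d := PySem.Dict.ofList counter
  let ordered := PySem.List.dedup order
  let pos := (PySem.List.enumerate ordered 0).foldl (fun p q => p.insert q.2 q.1) PySem.Dict.empty
  let n : Int := order.length
  let keys := PySem.Set.union (PySem.Set.ofList order) d.keys
  let sortedKeys := PySem.List.sorted2 keys
    (fun k => if pos.contains k then pos.getD k 0 else n)
    (fun k => if pos.contains k then "" else k) false
  sortedKeys.map (fun k => (k, d.getD k 0))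

-- ===== PRECONDITION & SPEC =====
def Spec_counts_with_order_py (counter : List (String × Int)) (order : List String) (out : List (String × Int)) : Prop := out = counts_with_order_py_alt counter order
instance (counter : List (String × Int)) (order : List String) (out : List (String × Int)) : Decidable (Spec_counts_with_order_py counter order out) := by unfold Spec_counts_with_order_py; infer_instance

-- ===== CLAIM (what is proved, stated in full; the proofs are below) =====
def Claim_equal_counts_with_order_py : Prop := ∀ (counter : List (String × Int)) (order : List String), Dom_counts_with_order_py counter order → Spec_counts_with_order_py counter order (counts_with_order_py counter order)

-- ===== LEMMAS AND PROOFS =====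

theorem pv_contains_eq_set (dd : PySem.Dict String Int) (s : List String) (h : dd.keys = s) :
    ∀ k, dd.contains k = PySem.Set.contains s k := by
  intro k
  by_cases hm : k ∈ s
  · rw [(PySem.Dict.contains_iff_mem_keys dd k).mpr (h ▸ hm), (PySem.Set.contains_iff s k).mpr hm]
  · have h1 : ¬ dd.contains k = true := fun hc => hm (h ▸ (PySem.Dict.contains_iff_mem_keys dd k).mp hc)
    have h2 : ¬ PySem.Set.contains s k = true := fun hc => hm ((PySem.Set.contains_iff s k).mp hc)
    simp only [Bool.not_eq_true] at h1 h2
    rw [h1, h2]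

theorem pv_get?_foldl_insert_const (v : String → Int) (l : List String)
    (d0 : PySem.Dict String Int) (x : String) :
    (l.foldl (fun o k => o.insert k (v k)) d0).get? x
      = if x ∈ l then some (v x) else d0.get? x := by
  induction l generalizing d0 with
  | nil => simp
  | cons y t ih =>
    simp only [List.foldl_cons, List.mem_cons]
    rw [ih]
    by_cases ht : x ∈ t
    · simp [ht]
    · by_cases hy : x = y
      · subst hy; simp [ht, PySem.Dict.get?_insert_self]
      · simp [ht, hy, PySem.Dict.get?_insert_of_ne _ _ hy]

theorem pv_get?_foldl_insert_of_not_mem (l : List (Int × String)) (d0 : PySem.Dict String Int)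
    (x : String) (hx : x ∉ l.map (·.2)) :
    (l.foldl (fun p q => p.insert q.2 q.1) d0).get? x = d0.get? x := by
  induction l generalizing d0 with
  | nil => rfl
  | cons q t ih =>
    simp only [List.map_cons, List.mem_cons] at hx
    push_neg at hx
    simp only [List.foldl_cons]
    rw [ih _ hx.2, PySem.Dict.get?_insert_of_ne _ _ hx.1]

theorem pv_get?_pos (O : List String) (hn : O.Nodup) (j : Nat) (hj : j < O.length)
    (s : Int) (d0 : PySem.Dict String Int) :
    ((PySem.List.enumerate O s).foldl (fun p q => p.insert q.2 q.1) d0).get? O[j] = some (s + j) := by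
  induction O generalizing s d0 j with
  | nil => simp at hj
  | cons x t ih =>
    rw [PySem.List.enumerate_cons]
    simp only [List.foldl_cons]
    rcases j with _ | j
    · have hx : x ∉ (PySem.List.enumerate t (s + 1)).map (·.2) := by
        rw [PySem.List.map_snd_enumerate]
        exact (List.nodup_cons.mp hn).1
      rw [List.getElem_cons_zero, pv_get?_foldl_insert_of_not_mem _ _ _ hx,
        PySem.Dict.get?_insert_self]
      norm_num
    · have h := ih (List.nodup_cons.mp hn).2 j (by simpa using hj) (s + 1) (d0.insert x s)
      rw [List.getElem_cons_succ, h]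
      congr 1
      push_cast
      ring

theorem pv_sorted2_eq_sorted_toLex {α κ₁ κ₂ : Type} [LinearOrder κ₁] [LinearOrder κ₂]
    (xs : List α) (k1 : α → κ₁) (k2 : α → κ₂) :
    PySem.List.sorted2 xs k1 k2 false = PySem.List.sorted xs (fun x => toLex (k1 x, k2 x)) false := by
  have hf : (fun a b => decide (k1 a < k1 b) || (!decide (k1 b < k1 a) && decide (k2 a < k2 b)))
      = (fun a b : α => decide (toLex (k1 a, k2 a) < toLex (k1 b, k2 b))) := by
    funext a b
    rcases lt_trichotomy (k1 a) (k1 b) with h | h | h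
    · simp [h, Prod.Lex.lt_iff]
    · simp [h, Prod.Lex.lt_iff]
    · simp [Prod.Lex.lt_iff, lt_asymm h, h, h.ne']
  show List.foldl _ [] xs = List.foldl _ [] xs
  rw [hf]

theorem pv_sorted2_eq_of_perm_of_pairwise_lt {α κ₁ κ₂ : Type} [LinearOrder κ₁] [LinearOrder κ₂]
    (xs ys : List α) (k1 : α → κ₁) (k2 : α → κ₂) (hperm : ys.Perm xs)
    (hpw : ys.Pairwise (fun a b => k1 a < k1 b ∨ (k1 a = k1 b ∧ k2 a < k2 b))) :
    PySem.List.sorted2 xs k1 k2 false = ys := by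
  rw [pv_sorted2_eq_sorted_toLex]
  refine PySem.List.sorted_eq_of_perm_of_pairwise_lt xs ys _ hperm ?_
  refine hpw.imp ?_
  intro a b h
  rw [Prod.Lex.lt_iff]
  exact h

theorem pv_main' (d : PySem.Dict String Int) (hdk : d.keys.Nodup) (order : List String) :
    ((PySem.List.sorted
        (d.keys.filter (fun key =>
          !((order.foldl (fun o key => o.insert key (d.getD key 0)) PySem.Dict.empty).contains key)))
        (fun x => x) false).foldl (fun o key => o.insert key (d.getD key 0))
        (order.foldl (fun o key => o.insert key (d.getD key 0)) PySem.Dict.empty)).items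
    = (PySem.List.sorted2 (PySem.Set.union (PySem.Set.ofList order) d.keys)
        (fun k => if ((PySem.List.enumerate (PySem.List.dedup order) 0).foldl
            (fun p q => p.insert q.2 q.1) PySem.Dict.empty).contains k
          then ((PySem.List.enumerate (PySem.List.dedup order) 0).foldl
            (fun p q => p.insert q.2 q.1) PySem.Dict.empty).getD k 0
          else (order.length : Int))
        (fun k => if ((PySem.List.enumerate (PySem.List.dedup order) 0).foldl
            (fun p q => p.insert q.2 q.1) PySem.Dict.empty).contains k
          then "" else k) false).map (fun k => (k, d.getD k 0)) := by
  rw [PySem.List.dedup_eq_ofList]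
  set O := PySem.Set.ofList order with hO
  set out1 := order.foldl (fun o key => o.insert key (d.getD key 0)) PySem.Dict.empty with hout1
  set pos := (PySem.List.enumerate O 0).foldl (fun p q => p.insert q.2 q.1) PySem.Dict.empty with hpos
  set extras := d.keys.filter (fun key => !(out1.contains key)) with hextras
  set sExtras := PySem.List.sorted extras (fun x => x) false with hsE
  set f : String → String × Int := fun k => (k, d.getD k 0) with hf
  -- basic facts
  have hOnd : O.Nodup := PySem.Set.nodup_ofList order
  have hkeys1 : out1.keys = O := by
    rw [hout1, PySem.Dict.keys_foldl_insert order (fun _ key => d.getD key 0) PySem.Dict.empty]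
    rfl
  have hnd1 : out1.keys.Nodup := by rw [hkeys1]; exact hOnd
  have hcont1 : ∀ k, out1.contains k = PySem.Set.contains O k := pv_contains_eq_set out1 O hkeys1
  have hget1 : ∀ k ∈ O, out1.getD k 0 = d.getD k 0 := by
    intro k hk
    have hk' : k ∈ order := (PySem.Set.mem_ofList order k).mp hk
    refine PySem.Dict.getD_of_get?_eq_some _ _ ?_
    rw [hout1, pv_get?_foldl_insert_const (fun key => d.getD key 0) order PySem.Dict.empty k,
      if_pos hk']
  -- pos facts
  have hkpos : pos.keys = O := by
    have h := PySem.Dict.keys_foldl_insert_key (ν := Int) (PySem.List.enumerate O 0)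
      (fun q : Int × String => q.2) (fun _ q => q.1) PySem.Dict.empty
    rw [hpos]
    refine Eq.trans h ?_
    rw [PySem.List.map_snd_enumerate]
    show PySem.Set.update PySem.Dict.empty.keys O = O
    refine Eq.trans ?_ (PySem.Set.ofList_eq_self_of_nodup O hOnd)
    rfl
  have hposc : ∀ k, pos.contains k = PySem.Set.contains O k := pv_contains_eq_set pos O hkpos
  have hnotO_false : ∀ {k : String}, k ∉ O → PySem.Set.contains O k = false := by
    intro k hk
    have : ¬ PySem.Set.contains O k = true := fun hc => hk ((PySem.Set.contains_iff O k).mp hc)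
    simpa using this
  have hinO_true : ∀ {k : String}, k ∈ O → PySem.Set.contains O k = true := by
    intro k hk; exact (PySem.Set.contains_iff O k).mpr hk
  have hk1O : ∀ (j : Nat) (hj : j < O.length),
      (if pos.contains O[j] then pos.getD O[j] 0 else (order.length : Int)) = (j : Int) := by
    intro j hj
    rw [hposc, if_pos (hinO_true (O.getElem_mem hj))]
    have := pv_get?_pos O hOnd j hj 0 PySem.Dict.empty
    rw [← hpos] at this
    rw [PySem.Dict.getD_of_get?_eq_some _ _ this]
    norm_num
  -- extras facts
  have hEnd : extras.Nodup := List.Nodup.filter _ hdk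
  have hsEperm : sExtras.Perm extras := PySem.List.sorted_perm extras (fun x => x) false
  have hsEnd : sExtras.Nodup := hsEperm.nodup_iff.mpr hEnd
  have hsEnotO : ∀ b ∈ sExtras, b ∉ O := by
    intro b hb hbO
    have hb' := (List.mem_filter.mp (hsEperm.mem_iff.mp hb)).2
    rw [hcont1 b, hinO_true hbO] at hb'
    simp at hb'
  have hsEcontfalse : ∀ b ∈ sExtras, pos.contains b = false := by
    intro b hb
    rw [hposc]
    exact hnotO_false (hsEnotO b hb)
  -- the sorted2 characterization
  have hT : PySem.List.sorted2 (PySem.Set.union O d.keys)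
      (fun k => if pos.contains k then pos.getD k 0 else (order.length : Int))
      (fun k => if pos.contains k then "" else k) false = O ++ sExtras := by
    apply pv_sorted2_eq_of_perm_of_pairwise_lt
    · have hu : PySem.Set.union O d.keys = O ++ extras := by
        refine Eq.trans (PySem.Set.update_eq_append_filter O d.keys) ?_
        rw [PySem.Set.ofList_eq_self_of_nodup d.keys hdk]
        congr 1
        rw [hextras]
        refine List.filter_congr ?_
        intro k _
        rw [hcont1 k]
      rw [hu]
      exact hsEperm.append_left O
    · rw [List.pairwise_append]
      refine ⟨?_, ?_, ?_⟩
      · rw [List.pairwise_iff_getElem]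
        intro i j hi hj hij
        left
        rw [hk1O i hi, hk1O j hj]
        exact_mod_cast hij
      · have hlt : sExtras.Pairwise (· < ·) := by
          have h1 := PySem.List.sorted_pairwise extras (fun x => x)
          rw [← hsE] at h1
          exact (h1.and hsEnd).imp (fun h => lt_of_le_of_ne h.1 h.2)
        refine hlt.imp_of_mem ?_
        intro a b ha hb hab
        right
        rw [hsEcontfalse a ha, hsEcontfalse b hb]
        exact ⟨rfl, by simpa using hab⟩
      · intro a ha b hb
        left
        obtain ⟨j, hj, rfl⟩ := List.mem_iff_getElem.mp ha
        rw [hk1O j hj, hsEcontfalse b hb]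
        simp only [Bool.false_eq_true, if_false]
        have hle : O.length ≤ order.length := PySem.Set.length_ofList_le order
        exact_mod_cast Nat.lt_of_lt_of_le hj hle
  -- A's result
  have hfresh : ∀ a ∈ sExtras, out1.contains ((fun k => k) a) = false := by
    intro a ha
    rw [hcont1 a]
    exact hnotO_false (hsEnotO a ha)
  have hA : (sExtras.foldl (fun o key => o.insert key (d.getD key 0)) out1).items
      = (O ++ sExtras).map f := by
    have h := PySem.Dict.items_foldl_insert_fresh sExtras (fun k => k)
      (fun k => d.getD k 0) out1 hfresh (by simpa using hsEnd)
    refine Eq.trans h ?_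
    rw [List.map_append]
    congr 1
    rw [PySem.Dict.items_eq_map_keys out1 hnd1 0, hkeys1]
    refine List.map_congr_left ?_
    intro k hk
    rw [hf, hget1 k hk]
  rw [hT, hA]

-- ===== VERDICT (by name: the statement is the Claim_ definition above) =====
theorem counts_with_order_py_spec : Claim_equal_counts_with_order_py := by
  intro counter order _
  unfold Spec_counts_with_order_py
  exact pv_main' (PySem.Dict.ofList counter) (PySem.Dict.nodup_keys_ofList counter) order
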